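-- pv_equiv track=rewrite | github.com/anubhavsrivastava10/Data-Structure | subarray_max_gcd.py | longsub_gcd
-- ===== SOURCE A (Python) =====
-- from math import gcd
--
-- def longsub_gcd(n,arr):
--     if n==1:
--         return 0
--     k = 1
--     # finding the GCD of the two consecutive element.
--     for i in range(1,n):
--         k = max(k, gcd(arr[i],arr[i-1]))
--     # you have found the max of the pair for the given array.
--     count = 0
--     maxlen = 0
--     # checking if there is more than 2 numbers for a pair.
--     for i in range(n):
--         if arr[i]%k==0:
--             count+=1
--         else:
--             maxlen = max(maxlen,count)
--             count = 0
--     # finding the longest sequence.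
--     maxlen = max(maxlen, count)
--     return maxlen
-- ===== SOURCE B (Python) =====
-- from math import gcd
--
-- def longsub_gcd(n, arr):
--     if n <= 1:
--         return 0
--     k = max([1] + [gcd(a, b) for a, b in zip(arr[:n], arr[1:n])])
--     bounds = [-1] + [i for i in range(n) if arr[i] % k != 0] + [n]
--     return max(b - a - 1 for a, b in zip(bounds, bounds[1:]))
-- ===== Notes on version B (the rewrite author's own statement) =====
-- stated objective: alternative
-- what changed: Replaces A's running count-and-reset state machine by boundary arithmetic: B collects the positions of the non-divisible elements, pads them with sentinels -1 and n, and returns the maximum gap between consecutive positions minus one (run lengths as differences of boundary indices); k is a max over a pairwise-gcd comprehension instead of an index loop.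
import Mathlib
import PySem

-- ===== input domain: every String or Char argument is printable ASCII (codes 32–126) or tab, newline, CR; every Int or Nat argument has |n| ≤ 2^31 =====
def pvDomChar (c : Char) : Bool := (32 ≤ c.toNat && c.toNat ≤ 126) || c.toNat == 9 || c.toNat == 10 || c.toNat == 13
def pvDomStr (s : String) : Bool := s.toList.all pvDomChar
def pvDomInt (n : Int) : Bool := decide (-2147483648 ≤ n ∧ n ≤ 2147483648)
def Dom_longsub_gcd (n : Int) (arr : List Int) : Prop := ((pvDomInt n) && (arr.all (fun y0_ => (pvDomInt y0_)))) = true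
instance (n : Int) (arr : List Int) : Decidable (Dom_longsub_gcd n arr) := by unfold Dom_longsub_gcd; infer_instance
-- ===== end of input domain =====

-- B replaces A's running count-and-reset scan by boundary arithmetic: it collects the
-- positions of the non-divisible elements and returns the largest gap between consecutive
-- sentinel-padded positions (a run length is a difference of boundary indices): alternative.

-- ===== PORT A =====
def longsub_gcd (n : Int) (arr : List Int) : Int :=
  if n == 1 then 0
  else
    -- k = max over range(1,n) of gcd(arr[i], arr[i-1]), starting from 1
    let k := (PySem.List.pyRange 1 n 1).foldl
      (fun k i => max k ((Int.gcd (PySem.List.pyGetD arr i 0) (PySem.List.pyGetD arr (i-1) 0) : Nat) : Int)) 1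
    -- the (count, maxlen) loop over range(n)
    let p := (PySem.List.pyRange 0 n 1).foldl
      (fun (s : Int × Int) i =>
        if PySem.Int.mod (PySem.List.pyGetD arr i 0) k == 0 then (s.1 + 1, s.2)
        else (0, max s.2 s.1)) ((0 : Int), (0 : Int))
    max p.2 p.1

-- ===== PORT B =====
def longsub_gcd_alt (n : Int) (arr : List Int) : Int :=
  if n ≤ 1 then 0
  else
    -- k = max([1] + [gcd(a, b) for a, b in zip(arr[:n], arr[1:n])])
    let k := (PySem.List.max?
      ((1 : Int) :: ((PySem.List.slice arr none (some n)).zip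
          (PySem.List.slice arr (some 1) (some n))).map
        (fun p => ((Int.gcd p.1 p.2 : Nat) : Int))) (fun y => y)).getD 0
    -- bounds = [-1] + [i for i in range(n) if arr[i] % k != 0] + [n]
    let bounds := (-1 : Int) ::
      ((PySem.List.pyRange 0 n 1).filter
        (fun i => PySem.Int.mod (PySem.List.pyGetD arr i 0) k != 0)) ++ [n]
    -- max(b - a - 1 for a, b in zip(bounds, bounds[1:])) — bounds has ≥ 2 elements here
    (PySem.List.max? ((bounds.zip bounds.tail).map (fun p => p.2 - p.1 - 1)) (fun y => y)).getD 0

-- ===== PRECONDITION & SPEC =====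
-- Pre_ excludes exactly the inputs where A raises IndexError: n ≥ 2 with fewer than n elements.
def Pre_longsub_gcd (n : Int) (arr : List Int) : Prop := n ≤ (arr.length : Int) ∨ n ≤ 1
instance (n : Int) (arr : List Int) : Decidable (Pre_longsub_gcd n arr) := by
  unfold Pre_longsub_gcd; infer_instance
def pvWitness_longsub_gcd : Int × List Int := (4, [4, 8, 3, 6])

def Spec_longsub_gcd (n : Int) (arr : List Int) (out : Int) : Prop := out = longsub_gcd_alt n arr
instance (n : Int) (arr : List Int) (out : Int) : Decidable (Spec_longsub_gcd n arr out) := by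
  unfold Spec_longsub_gcd; infer_instance

-- ===== CLAIM (what is proved, stated in full; the proofs are below) =====
def Claim_equal_longsub_gcd : Prop := ∀ (n : Int) (arr : List Int), Dom_longsub_gcd n arr → Pre_longsub_gcd n arr → Spec_longsub_gcd n arr (longsub_gcd n arr)

-- ===== LEMMAS AND PROOFS =====

-- gcds of consecutive pairs (proof-side normal form shared by both k computations)
def pvPairGcds (xs : List Int) : List Int :=
  (xs.zip xs.tail).map (fun p => ((Int.gcd p.1 p.2 : Nat) : Int))

-- (length of the leading run of p-elements, length of the longest run of p-elements)
def pvRun (p : Int → Bool) : List Int → Int × Int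
  | [] => (0, 0)
  | x :: t =>
    let s := pvRun p t
    if p x then (s.1 + 1, max (s.1 + 1) s.2) else (0, s.2)

-- positions (0-based) of the elements where p is FALSE
def pvBadIdx (p : Int → Bool) : List Int → List Int
  | [] => []
  | x :: t => if p x then (pvBadIdx p t).map (· + 1) else 0 :: (pvBadIdx p t).map (· + 1)

-- consecutive differences minus one
def pvDiffs : List Int → List Int
  | [] => []
  | [_] => []
  | a :: b :: l => (b - a - 1) :: pvDiffs (b :: l)

lemma pvRun_bounds (p : Int → Bool) (xs : List Int) :
    0 ≤ (pvRun p xs).1 ∧ (pvRun p xs).1 ≤ (pvRun p xs).2 := by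
  induction xs with
  | nil => simp [pvRun]
  | cons x t ih =>
      obtain ⟨h1, h2⟩ := ih
      by_cases hp : p x
      · have e1 : (pvRun p (x :: t)).1 = (pvRun p t).1 + 1 := by simp [pvRun, hp]
        have e2 : (pvRun p (x :: t)).2 = max ((pvRun p t).1 + 1) (pvRun p t).2 := by
          simp [pvRun, hp]
        rw [e1, e2]; omega
      · have hp' : p x = false := by simpa using hp
        have e1 : (pvRun p (x :: t)).1 = 0 := by simp [pvRun, hp']
        have e2 : (pvRun p (x :: t)).2 = (pvRun p t).2 := by simp [pvRun, hp']
        rw [e1, e2]; omega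

lemma foldl_max_comm (L : List Int) (a b : Int) :
    max (L.foldl max a) b = L.foldl max (max a b) := by
  induction L generalizing a with
  | nil => rfl
  | cons x L ih =>
      simp only [List.foldl_cons]
      rw [ih (max a x)]
      congr 1
      exact max_right_comm a x b

-- ----- A's first loop equals the fold of the pair gcds -----
lemma a_k_eq (arr : List Int) (n : Int) (h2 : 2 ≤ n) (hlen : n ≤ (arr.length : Int)) :
    (PySem.List.pyRange 1 n 1).foldl
      (fun k i => max k ((Int.gcd (PySem.List.pyGetD arr i 0) (PySem.List.pyGetD arr (i-1) 0) : Nat) : Int)) 1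
      = (pvPairGcds (arr.take n.toNat)).foldl max 1 := by
  have hmap : pvPairGcds (arr.take n.toNat)
      = (PySem.List.pyRange 1 n 1).map
          (fun i => ((Int.gcd (PySem.List.pyGetD arr i 0) (PySem.List.pyGetD arr (i-1) 0) : Nat) : Int)) := by
    apply List.ext_getElem
    · simp [pvPairGcds, PySem.List.length_pyRange_one]
      omega
    · intro j hj hj'
      have hjlt : (j : Int) + 1 < n := by
        simp [pvPairGcds] at hj
        omega
      have hjarr : j + 1 < arr.length := by omega
      simp only [pvPairGcds, List.getElem_map, List.getElem_zip, PySem.List.getElem_pyRange_one]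
      have e1 : PySem.List.pyGetD arr (1 + (j : Int)) 0 = arr[j + 1] := by
        rw [PySem.List.pyGetD_eq_getElem arr 0 (by omega) (by omega)]
        congr 1
        omega
      have e2 : PySem.List.pyGetD arr (1 + (j : Int) - 1) 0 = arr[j] := by
        rw [PySem.List.pyGetD_eq_getElem arr 0 (by omega) (by omega)]
        congr 1
        omega
      rw [e1, e2]
      simp only [List.getElem_tail, List.getElem_take]
      rw [Int.gcd_comm]
  rw [hmap, List.foldl_map]

-- ----- B's k equals the same fold -----
lemma b_k_eq (arr : List Int) (n : Int) (h2 : 2 ≤ n) (hlen : n ≤ (arr.length : Int)) :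
    (PySem.List.max?
      ((1 : Int) :: ((PySem.List.slice arr none (some n)).zip
          (PySem.List.slice arr (some 1) (some n))).map
        (fun p => ((Int.gcd p.1 p.2 : Nat) : Int))) (fun y => y)).getD 0
      = (pvPairGcds (arr.take n.toNat)).foldl max 1 := by
  have h1 : PySem.List.slice arr none (some n) = arr.take n.toNat :=
    PySem.List.slice_to arr (by omega)
  have h2' : PySem.List.slice arr (some 1) (some n) = (arr.take n.toNat).tail := by
    rw [PySem.List.slice_toNat arr (by omega) (by omega)]
    rw [← List.drop_one, List.drop_take]
    congr 1
  rw [h1, h2', PySem.List.max?_id_cons]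
  simp [pvPairGcds]

-- ----- A's second loop in terms of pvRun -----
lemma loop_eq_run (p : Int → Bool) (xs : List Int) :
    ∀ (c m : Int), 0 ≤ c →
      max (xs.foldl (fun (s : Int × Int) x =>
          if p x then (s.1 + 1, s.2) else (0, max s.2 s.1)) (c, m)).2
        (xs.foldl (fun (s : Int × Int) x =>
          if p x then (s.1 + 1, s.2) else (0, max s.2 s.1)) (c, m)).1
        = max m (max (pvRun p xs).2 (c + (pvRun p xs).1)) := by
  induction xs with
  | nil =>
      intro c m hc
      simp only [List.foldl_nil]
      have e1 : (pvRun p []).1 = 0 := rfl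
      have e2 : (pvRun p []).2 = 0 := rfl
      rw [e1, e2]
      omega
  | cons x t ih =>
      intro c m hc
      obtain ⟨hb1, hb2⟩ := pvRun_bounds p t
      by_cases hp : p x
      · have e1 : (pvRun p (x :: t)).1 = (pvRun p t).1 + 1 := by simp [pvRun, hp]
        have e2 : (pvRun p (x :: t)).2 = max ((pvRun p t).1 + 1) (pvRun p t).2 := by
          simp [pvRun, hp]
        simp only [List.foldl_cons, hp, reduceIte]
        rw [ih (c + 1) m (by omega), e1, e2]
        omega
      · have hp' : p x = false := by simpa using hp
        have e1 : (pvRun p (x :: t)).1 = 0 := by simp [pvRun, hp']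
        have e2 : (pvRun p (x :: t)).2 = (pvRun p t).2 := by simp [pvRun, hp']
        simp only [List.foldl_cons, hp', Bool.false_eq_true, reduceIte]
        rw [ih 0 (max m c) le_rfl, e1, e2]
        omega

-- ----- A's index loop over arr equals the structural fold over take n arr -----
lemma a_loop_struct (arr : List Int) (n : Int) (h2 : 2 ≤ n) (hlen : n ≤ (arr.length : Int))
    (f : Int × Int → Int → Int × Int) :
    (PySem.List.pyRange 0 n 1).foldl
        (fun (s : Int × Int) i => f s (PySem.List.pyGetD arr i 0)) ((0 : Int), (0 : Int))
      = (arr.take n.toNat).foldl f ((0 : Int), (0 : Int)) := by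
  have hxs : ((arr.take n.toNat).length : Int) = n := by
    simp; omega
  have hcongr : (PySem.List.pyRange 0 n 1).foldl
      (fun (s : Int × Int) i => f s (PySem.List.pyGetD arr i 0)) ((0 : Int), (0 : Int))
      = (PySem.List.pyRange 0 n 1).foldl
      (fun (s : Int × Int) i => f s (PySem.List.pyGetD (arr.take n.toNat) i 0)) ((0 : Int), (0 : Int)) := by
    apply PySem.List.foldl_congr_mem
    intro acc i hi
    rw [PySem.List.mem_pyRange_one] at hi
    rw [PySem.List.pyGetD_eq_getElem arr 0 hi.1 (by omega),
      PySem.List.pyGetD_eq_getElem (arr.take n.toNat) 0 hi.1 (by omega)]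
    simp only [List.getElem_take]
  rw [hcongr]
  generalize hg : arr.take n.toNat = xs
  rw [hg] at hxs
  rw [← hxs]
  exact PySem.List.foldl_pyRange_zero_pyGetD' xs 0 f ((0 : Int), (0 : Int))

-- ----- B's filtered range equals pvBadIdx -----
lemma pyRange_zero_succ (m : Nat) :
    PySem.List.pyRange 0 ((m : Int) + 1) 1
      = 0 :: (PySem.List.pyRange 0 (m : Int) 1).map (· + 1) := by
  rw [PySem.List.pyRange_one_cons (by omega)]
  congr 1
  rw [PySem.List.pyRange_one, PySem.List.pyRange_one, List.map_map]
  have hn : ((m : Int) + 1 - (0 + 1)).toNat = ((m : Int) - 0).toNat := by omega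
  rw [hn]
  apply List.map_congr_left
  intro k _
  simp [Function.comp]
  omega

lemma pyGetD_cons_succ (x : Int) (t : List Int) (i : Int) (hi : 0 ≤ i)
    (h : i < (t.length : Int)) :
    PySem.List.pyGetD (x :: t) (i + 1) 0 = PySem.List.pyGetD t i 0 := by
  rw [PySem.List.pyGetD_eq_getElem (x :: t) 0 (by omega) (by simp; omega),
    PySem.List.pyGetD_eq_getElem t 0 hi (by omega)]
  have hnat : (i + 1).toNat = i.toNat + 1 := by omega
  simp [hnat]

lemma filter_range_eq_badIdx (p : Int → Bool) (xs : List Int) :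
    (PySem.List.pyRange 0 (xs.length : Int) 1).filter
        (fun i => !(p (PySem.List.pyGetD xs i 0)))
      = pvBadIdx p xs := by
  induction xs with
  | nil => simp [PySem.List.pyRange_one_eq_nil, pvBadIdx]
  | cons x t ih =>
      have hl : ((x :: t).length : Int) = (t.length : Int) + 1 := by simp
      have hx0 : PySem.List.pyGetD (x :: t) 0 0 = x := PySem.List.pyGetD_zero_cons x t 0
      have htail : ((PySem.List.pyRange 0 (t.length : Int) 1).map (· + 1)).filter
            (fun i => !(p (PySem.List.pyGetD (x :: t) i 0)))
          = (pvBadIdx p t).map (· + 1) := by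
        rw [List.filter_map]
        have hfc : ((PySem.List.pyRange 0 (t.length : Int) 1).filter
              ((fun i => !(p (PySem.List.pyGetD (x :: t) i 0))) ∘ (· + 1)))
            = (PySem.List.pyRange 0 (t.length : Int) 1).filter
              (fun i => !(p (PySem.List.pyGetD t i 0))) := by
          apply List.filter_congr
          intro i hi
          rw [PySem.List.mem_pyRange_one] at hi
          simp only [Function.comp_apply]
          rw [pyGetD_cons_succ x t i hi.1 hi.2]
        rw [hfc, ih]
      rw [hl, pyRange_zero_succ t.length, List.filter_cons, htail, hx0]
      by_cases hp : p x
      · have hp' : p x = true := hp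
        simp [pvBadIdx, hp']
      · have hp' : p x = false := by simpa using hp
        simp [pvBadIdx, hp']

-- ----- pvDiffs bookkeeping -----
lemma pvDiffs_cons_cons (a b : Int) (l : List Int) :
    pvDiffs (a :: b :: l) = (b - a - 1) :: pvDiffs (b :: l) := rfl

lemma pvDiffs_map_add_one (l : List Int) :
    pvDiffs (l.map (· + 1)) = pvDiffs l := by
  induction l with
  | nil => rfl
  | cons a l ih =>
      cases l with
      | nil => rfl
      | cons b l' =>
          simp only [List.map_cons] at ih ⊢
          rw [pvDiffs_cons_cons, pvDiffs_cons_cons, ih]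
          congr 1
          omega

lemma zip_tail_eq_pvDiffs (l : List Int) :
    (l.zip l.tail).map (fun p => p.2 - p.1 - 1) = pvDiffs l := by
  induction l with
  | nil => rfl
  | cons a l ih =>
      cases l with
      | nil => rfl
      | cons b l' =>
          simp only [List.tail_cons, List.zip_cons_cons, List.map_cons] at ih ⊢
          rw [pvDiffs_cons_cons, ← ih]

-- the key invariant: the gap list of the sentinel-padded bad positions is
-- (leading run length) :: ds with foldl max over it giving the best run length
lemma diffs_eq_run (p : Int → Bool) (xs : List Int) :
    ∃ ds, pvDiffs ((-1) :: (pvBadIdx p xs ++ [(xs.length : Int)])) = (pvRun p xs).1 :: ds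
      ∧ ds.foldl max (pvRun p xs).1 = (pvRun p xs).2 := by
  induction xs with
  | nil =>
      refine ⟨[], ?_, ?_⟩
      · norm_num [pvBadIdx, pvRun, pvDiffs]
      · rfl
  | cons x t ih =>
      obtain ⟨ds, hds, hmax⟩ := ih
      obtain ⟨hb1, hb2⟩ := pvRun_bounds p t
      by_cases hp : p x
      · have hp' : p x = true := hp
        have e1 : (pvRun p (x :: t)).1 = (pvRun p t).1 + 1 := by simp [pvRun, hp']
        have e2 : (pvRun p (x :: t)).2 = max ((pvRun p t).1 + 1) (pvRun p t).2 := by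
          simp [pvRun, hp']
        rcases hys : pvBadIdx p t ++ [(t.length : Int)] with _ | ⟨y, ys⟩
        · exact absurd hys (by simp)
        · rw [hys, pvDiffs_cons_cons, List.cons_eq_cons] at hds
          obtain ⟨hy, htl⟩ := hds
          refine ⟨ds, ?_, ?_⟩
          · have hshape : (-1 : Int) :: (pvBadIdx p (x :: t) ++ [((x :: t).length : Int)])
                = (-1 : Int) :: (y + 1) :: ys.map (· + 1) := by
              have hb : pvBadIdx p (x :: t) = (pvBadIdx p t).map (· + 1) := by
                simp [pvBadIdx, hp']
              rw [hb]
              have hmm : (pvBadIdx p t).map (· + 1) ++ [((x :: t).length : Int)]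
                  = (pvBadIdx p t ++ [(t.length : Int)]).map (· + 1) := by
                simp
              rw [hmm, hys]
              simp
            rw [hshape, pvDiffs_cons_cons]
            have hm1 : pvDiffs ((y + 1) :: ys.map (· + 1)) = pvDiffs (y :: ys) := by
              have h := pvDiffs_map_add_one (y :: ys)
              simpa using h
            rw [hm1, htl, e1]
            congr 1
            omega
          · rw [e1, e2]
            have hcomm := foldl_max_comm ds (pvRun p t).1 ((pvRun p t).1 + 1)
            have hm : max (pvRun p t).1 ((pvRun p t).1 + 1) = (pvRun p t).1 + 1 := by omega
            rw [hm] at hcomm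
            rw [← hcomm, hmax]
            omega
      · have hp' : p x = false := by simpa using hp
        have e1 : (pvRun p (x :: t)).1 = 0 := by simp [pvRun, hp']
        have e2 : (pvRun p (x :: t)).2 = (pvRun p t).2 := by simp [pvRun, hp']
        refine ⟨(pvRun p t).1 :: ds, ?_, ?_⟩
        · have hshape : (-1 : Int) :: (pvBadIdx p (x :: t) ++ [((x :: t).length : Int)])
              = (-1 : Int) :: (0 : Int) :: (pvBadIdx p t ++ [(t.length : Int)]).map (· + 1) := by
            have hb : pvBadIdx p (x :: t) = 0 :: (pvBadIdx p t).map (· + 1) := by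
              simp [pvBadIdx, hp']
            rw [hb]
            simp
          rw [hshape, pvDiffs_cons_cons]
          have hm0 : (0 : Int) :: (pvBadIdx p t ++ [(t.length : Int)]).map (· + 1)
              = ((-1 : Int) :: (pvBadIdx p t ++ [(t.length : Int)])).map (· + 1) := by
            simp
          rw [hm0, pvDiffs_map_add_one]
          rw [hds, e1]
          norm_num
        · rw [e1, e2, List.foldl_cons]
          have h0 : max (0 : Int) (pvRun p t).1 = (pvRun p t).1 := by omega
          rw [h0, hmax]

-- ----- the main case n ≥ 2 -----
lemma main_case (n : Int) (arr : List Int) (h2 : 2 ≤ n) (hlen : n ≤ (arr.length : Int)) :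
    longsub_gcd n arr = longsub_gcd_alt n arr := by
  simp only [longsub_gcd, longsub_gcd_alt]
  rw [if_neg (by simp; omega), if_neg (by omega)]
  rw [a_k_eq arr n h2 hlen, b_k_eq arr n h2 hlen]
  rw [a_loop_struct arr n h2 hlen
    (fun s x => if PySem.Int.mod x ((pvPairGcds (arr.take n.toNat)).foldl max 1) == 0
      then (s.1 + 1, s.2) else (0, max s.2 s.1))]
  rw [loop_eq_run (fun x => PySem.Int.mod x ((pvPairGcds (arr.take n.toNat)).foldl max 1) == 0)
    (arr.take n.toNat) 0 0 le_rfl]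
  have hxlen : (((arr.take n.toNat) : List Int).length : Int) = n := by simp; omega
  have hfilt : (PySem.List.pyRange 0 n 1).filter
      (fun i => PySem.Int.mod (PySem.List.pyGetD arr i 0)
        ((pvPairGcds (arr.take n.toNat)).foldl max 1) != 0)
      = pvBadIdx (fun x => PySem.Int.mod x ((pvPairGcds (arr.take n.toNat)).foldl max 1) == 0)
        (arr.take n.toNat) := by
    have hcongr : (PySem.List.pyRange 0 n 1).filter
        (fun i => PySem.Int.mod (PySem.List.pyGetD arr i 0)
          ((pvPairGcds (arr.take n.toNat)).foldl max 1) != 0)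
        = (PySem.List.pyRange 0 n 1).filter
        (fun i => !(PySem.Int.mod (PySem.List.pyGetD (arr.take n.toNat) i 0)
          ((pvPairGcds (arr.take n.toNat)).foldl max 1) == 0)) := by
      apply List.filter_congr
      intro i hi
      rw [PySem.List.mem_pyRange_one] at hi
      rw [PySem.List.pyGetD_eq_getElem arr 0 hi.1 (by omega),
        PySem.List.pyGetD_eq_getElem (arr.take n.toNat) 0 hi.1 (by omega)]
      simp only [List.getElem_take]
      rfl
    have hfr := filter_range_eq_badIdx
      (fun x => PySem.Int.mod x ((pvPairGcds (arr.take n.toNat)).foldl max 1) == 0)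
      (arr.take n.toNat)
    rw [hxlen] at hfr
    rw [hcongr, hfr]
  rw [hfilt]
  obtain ⟨ds, hds, hmax⟩ := diffs_eq_run
    (fun x => PySem.Int.mod x ((pvPairGcds (arr.take n.toNat)).foldl max 1) == 0)
    (arr.take n.toNat)
  rw [hxlen] at hds
  rw [zip_tail_eq_pvDiffs, List.cons_append, hds, PySem.List.max?_id_cons]
  simp only [Option.getD_some]
  rw [hmax]
  obtain ⟨hb1, hb2⟩ := pvRun_bounds
    (fun x => PySem.Int.mod x ((pvPairGcds (arr.take n.toNat)).foldl max 1) == 0)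
    (arr.take n.toNat)
  omega

-- ===== VERDICT (by name: the statement is the Claim_ definition above) =====
theorem longsub_gcd_spec : Claim_equal_longsub_gcd := by
  intro n arr _ hpre
  unfold Spec_longsub_gcd
  by_cases h1 : n ≤ 1
  · rw [longsub_gcd_alt, if_pos h1, longsub_gcd]
    by_cases he : n = 1
    · rw [if_pos (by simp [he])]
    · rw [if_neg (by simp [he])]
      rw [PySem.List.pyRange_one_eq_nil (a := 0) (b := n) (by omega)]
      simp
  · exact main_case n arr (by omega) (by unfold Pre_longsub_gcd at hpre; omega)
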